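-- pv_equiv track=rewrite | github.com/SwierkKlaudia/python | basics/lists.py | L32a
-- ===== SOURCE A (Python) =====
-- def L32a(listA, animal, plant, unit):
--     new_list = []
--     for elem in listA:
--         if elem in animal:
--             new_list.append(elem + ':animal')
--         elif elem in plant:
--             new_list.append(elem + ':plant')
--         elif elem in unit:
--             new_list.append(elem + ':unit')
--         else:
--             new_list.append(elem)
--     return new_list
-- ===== SOURCE B (Python) =====
-- def L32a(listA, animal, plant, unit):
--     # Category-major staged passes: start from the untagged list, then for each
--     # category in increasing priority (unit, plant, animal) rewrite the positions
--     # whose original element belongs to it, so higher priority overwrites lower.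
--     result = list(listA)
--     for cat, suffix in ((unit, ':unit'), (plant, ':plant'), (animal, ':animal')):
--         members = set(cat)
--         result = [orig + suffix if orig in members else cur
--                   for orig, cur in zip(listA, result)]
--     return result
-- ===== Notes on version B (the rewrite author's own statement) =====
-- stated objective: alternative
-- what changed: Replaces A's element-major single pass with a per-element if/elif chain by a category-major computation: three staged full-list rewrite passes, one per category in increasing priority (unit, plant, animal), each overwriting the positions whose original element is in that category, so the last (animal) pass wins ties exactly like A's chain.
import Mathlib
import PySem

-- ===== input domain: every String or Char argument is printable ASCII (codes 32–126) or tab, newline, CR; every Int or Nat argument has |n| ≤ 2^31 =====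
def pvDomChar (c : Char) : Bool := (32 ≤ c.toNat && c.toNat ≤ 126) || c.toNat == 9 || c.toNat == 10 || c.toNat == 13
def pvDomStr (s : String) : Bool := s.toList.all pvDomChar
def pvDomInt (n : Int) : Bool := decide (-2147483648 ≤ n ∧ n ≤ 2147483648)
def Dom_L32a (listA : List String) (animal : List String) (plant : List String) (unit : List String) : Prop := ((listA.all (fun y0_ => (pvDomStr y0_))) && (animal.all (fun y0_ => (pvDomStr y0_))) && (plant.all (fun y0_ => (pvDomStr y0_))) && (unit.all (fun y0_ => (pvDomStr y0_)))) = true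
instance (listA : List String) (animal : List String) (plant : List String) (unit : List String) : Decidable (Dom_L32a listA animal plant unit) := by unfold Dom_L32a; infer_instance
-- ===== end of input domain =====

-- B recomputes the tagging category-major: three staged full-list rewrite passes in
-- increasing priority (unit, plant, animal), instead of A's per-element if/elif chain
-- (alternative decomposition, same result).


-- ===== PORT A =====
def L32a (listA : List String) (animal : List String) (plant : List String) (unit : List String) : List String :=
  listA.foldl (fun new_list elem =>
    if elem ∈ animal then new_list ++ [elem ++ ":animal"]
    else if elem ∈ plant then new_list ++ [elem ++ ":plant"]
    else if elem ∈ unit then new_list ++ [elem ++ ":unit"]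
    else new_list ++ [elem]) []

-- ===== PORT B =====
def L32a_alt (listA : List String) (animal : List String) (plant : List String) (unit : List String) : List String :=
  [(unit, ":unit"), (plant, ":plant"), (animal, ":animal")].foldl
    (fun result cs =>
      let members : PySem.Set String := PySem.Set.ofList cs.1
      (listA.zip result).map (fun p => if p.1 ∈ members then p.1 ++ cs.2 else p.2))
    listA

-- ===== PRECONDITION & SPEC =====
def Spec_L32a (listA : List String) (animal : List String) (plant : List String) (unit : List String) (out : List String) : Prop := out = L32a_alt listA animal plant unit
instance (listA : List String) (animal : List String) (plant : List String) (unit : List String) (out : List String) : Decidable (Spec_L32a listA animal plant unit out) := by unfold Spec_L32a; infer_instance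

-- ===== CLAIM (what is proved, stated in full; the proofs are below) =====
def Claim_equal_L32a : Prop := ∀ (listA : List String) (animal : List String) (plant : List String) (unit : List String), Dom_L32a listA animal plant unit → Spec_L32a listA animal plant unit (L32a listA animal plant unit)

-- ===== LEMMAS AND PROOFS =====

-- The first rewrite pass, over listA zipped with itself, is a map over listA.
theorem pass_on_self (listA m : List String) (s : String) :
    (listA.zip listA).map (fun p => if p.1 ∈ m then p.1 ++ s else p.2)
      = listA.map (fun e => if e ∈ m then e ++ s else e) := by
  induction listA with
  | nil => rfl
  | cons x xs ih => simp [ih]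

-- A later rewrite pass, over listA zipped with a previous map over listA, is again a map over listA.
theorem pass_on_map (listA m : List String) (s : String) (g : String → String) :
    (listA.zip (listA.map g)).map (fun p => if p.1 ∈ m then p.1 ++ s else p.2)
      = listA.map (fun e => if e ∈ m then e ++ s else g e) := by
  induction listA with
  | nil => rfl
  | cons x xs ih => simp [ih]

-- ===== VERDICT (by name: the statement is the Claim_ definition above) =====

theorem L32a_spec : Claim_equal_L32a := by
  intro listA animal plant unit _
  show L32a listA animal plant unit = L32a_alt listA animal plant unit
  simp only [L32a, L32a_alt, List.foldl_cons, List.foldl_nil]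
  have hA : (fun (new_list : List String) (elem : String) =>
      if elem ∈ animal then new_list ++ [elem ++ ":animal"]
      else if elem ∈ plant then new_list ++ [elem ++ ":plant"]
      else if elem ∈ unit then new_list ++ [elem ++ ":unit"]
      else new_list ++ [elem])
    = (fun (new_list : List String) (elem : String) => new_list ++
        [if elem ∈ animal then elem ++ ":animal"
         else if elem ∈ plant then elem ++ ":plant"
         else if elem ∈ unit then elem ++ ":unit" else elem]) := by
    funext acc x; split_ifs <;> rfl
  rw [hA, PySem.List.foldl_append_singleton_eq_map]
  simp only [pass_on_self, pass_on_map]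
  refine List.map_congr_left (fun e _ => ?_)
  simp only [PySem.Set.mem_ofList]
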